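-- pv_equiv track=rewrite | github.com/c1boo/Trading-Bot | long_buy_strategy - Copy.py | cci_check_long
-- ===== SOURCE A (Python) =====
-- MID_CANDLE_START = 0
--
-- def cci_check_long(cci_data):
--     down_trend = False
--     for value in cci_data[MID_CANDLE_START:]:
--         if value < -90:
--             down_trend = True
--         elif down_trend and value > -90:
--             return True
--
--     return False
-- ===== SOURCE B (Python) =====
-- MID_CANDLE_START = 0
--
-- def cci_check_long(cci_data):
--     data = cci_data[MID_CANDLE_START:]
--     i = next((j for j, v in enumerate(data) if v < -90), None)
--     if i is None:
--         return False
--     return any(v > -90 for v in data[i + 1:])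
-- ===== Notes on version B (the rewrite author's own statement) =====
-- stated objective: simpler
-- what changed: Replaces A's single flag-carrying loop by a two-phase decomposition: find the first dip index (< -90), then scan only the suffix after it for a recovery (> -90); no boolean state is threaded.
import Mathlib
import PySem

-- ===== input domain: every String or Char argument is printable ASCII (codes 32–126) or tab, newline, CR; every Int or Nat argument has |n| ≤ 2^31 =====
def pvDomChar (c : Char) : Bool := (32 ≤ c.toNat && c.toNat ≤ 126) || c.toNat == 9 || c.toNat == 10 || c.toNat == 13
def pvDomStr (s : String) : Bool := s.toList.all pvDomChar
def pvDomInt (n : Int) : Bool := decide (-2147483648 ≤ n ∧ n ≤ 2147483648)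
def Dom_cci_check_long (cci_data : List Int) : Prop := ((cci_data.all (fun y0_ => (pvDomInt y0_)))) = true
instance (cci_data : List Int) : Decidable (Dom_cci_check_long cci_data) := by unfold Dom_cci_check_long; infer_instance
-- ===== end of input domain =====

-- B replaces A's flag-carrying single loop by a two-phase decomposition (find first dip, then scan the suffix); objective: simpler.

-- ===== PORT A =====
-- A's loop carrying the mutable flag `down_trend`.
def cciLoopA : List Int → Bool → Bool
  | [], _ => false
  | v :: rest, down_trend =>
      if v < -90 then cciLoopA rest true
      else if down_trend && decide (v > -90) then true
      else cciLoopA rest down_trend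

def cci_check_long (cci_data : List Int) : Bool :=
  cciLoopA (PySem.List.slice cci_data (some ((0 : Int))) none) false

-- ===== PORT B =====
def cci_check_long_alt (cci_data : List Int) : Bool :=
  let data := PySem.List.slice cci_data (some ((0 : Int))) none
  match data.findIdx? (fun v => v < -90) with
  | none => false
  | some i => (PySem.List.slice data (some ((i : Int) + 1)) none).any (fun v => v > -90)

-- ===== PRECONDITION & SPEC =====
def Spec_cci_check_long (cci_data : List Int) (out : Bool) : Prop := out = cci_check_long_alt cci_data
instance (cci_data : List Int) (out : Bool) : Decidable (Spec_cci_check_long cci_data out) := by unfold Spec_cci_check_long; infer_instance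

-- ===== CLAIM (what is proved, stated in full; the proofs are below) =====
def Claim_equal_cci_check_long : Prop := ∀ (cci_data : List Int), Dom_cci_check_long cci_data → Spec_cci_check_long cci_data (cci_check_long cci_data)

-- ===== LEMMAS AND PROOFS =====

-- Once the flag is set, A just looks for any recovery (> -90) in the rest.
theorem cciLoopA_true_eq_any (l : List Int) :
    cciLoopA l true = l.any (fun v => v > -90) := by
  induction l with
  | nil => rfl
  | cons v rest ih =>
      simp only [cciLoopA, List.any_cons]
      by_cases h : v < -90
      · have h2 : ¬ v > -90 := by omega
        simp [h, h2, ih]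
      · by_cases h2 : v > -90
        · simp [h, h2]
        · simp [h, h2, ih]

theorem cciLoopA_false_eq (l : List Int) :
    cciLoopA l false =
      (match l.findIdx? (fun v => v < -90) with
       | none => false
       | some i => (PySem.List.slice l (some ((i : Int) + 1)) none).any (fun v => v > -90)) := by
  induction l with
  | nil => rfl
  | cons v rest ih =>
      by_cases h : v < -90
      · have hf : (v :: rest).findIdx? (fun v => v < -90) = some 0 := by
          simp [List.findIdx?_cons, h]
        have hs : PySem.List.slice (v :: rest) (some ((0 : Nat) + 1 : Int)) none = rest := by
          have : ((0 : Nat) + 1 : Int) = ((1 : Nat) : Int) := by norm_num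
          rw [this, PySem.List.slice_from_natCast]
          rfl
        simp only [cciLoopA, if_pos h, hf, hs]
        exact cciLoopA_true_eq_any rest
      · have hf : (v :: rest).findIdx? (fun v => v < -90) =
            (rest.findIdx? (fun v => v < -90)).map (· + 1) := by
          simp [List.findIdx?_cons, h]
        have hstep : cciLoopA (v :: rest) false = cciLoopA rest false := by
          simp [cciLoopA, h]
        rw [hstep, ih, hf]
        cases hr : rest.findIdx? (fun v => v < -90) with
        | none => rfl
        | some i =>
            simp only [Option.map_some]
            have h1 : PySem.List.slice (v :: rest) (some ((i + 1 : Nat) + 1 : Int)) none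
                = (v :: rest).drop (i + 1 + 1) := by
              have : ((i + 1 : Nat) + 1 : Int) = ((i + 2 : Nat) : Int) := by push_cast; ring
              rw [this, PySem.List.slice_from_natCast]
            have h2 : PySem.List.slice rest (some ((i : Nat) + 1 : Int)) none
                = rest.drop (i + 1) := by
              have : ((i : Nat) + 1 : Int) = ((i + 1 : Nat) : Int) := by push_cast; ring
              rw [this, PySem.List.slice_from_natCast]
            rw [h1, h2]
            rfl

-- ===== VERDICT (by name: the statement is the Claim_ definition above) =====
theorem cci_check_long_spec : Claim_equal_cci_check_long := by
  intro cci_data _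
  unfold Spec_cci_check_long cci_check_long cci_check_long_alt
  simp only []
  exact cciLoopA_false_eq _
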